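-- pv_equiv track=rewrite | github.com/possible055/relace-mcp | benchmark/datasets/mulocbench.py | _lines_to_ranges
-- ===== SOURCE A (Python) =====
-- def _lines_to_ranges(lines: set[int]) -> list[tuple[int, int]]:
--     if not lines:
--         return []
--
--     sorted_lines = sorted({line for line in lines if isinstance(line, int) and line > 0})
--     if not sorted_lines:
--         return []
--
--     ranges: list[tuple[int, int]] = []
--     start = prev = sorted_lines[0]
--
--     for line in sorted_lines[1:]:
--         if line == prev + 1:
--             prev = line
--             continue
--         ranges.append((start, prev))
--         start = prev = line
--
--     ranges.append((start, prev))
--     return ranges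
-- ===== SOURCE B (Python) =====
-- def _lines_to_ranges(lines: "set[int]") -> "list[tuple[int, int]]":
--     xs = sorted({line for line in lines if isinstance(line, int) and line > 0})
--     brk = [(a, b) for a, b in zip(xs, xs[1:]) if b != a + 1]
--     starts = xs[:1] + [b for _, b in brk]
--     ends = [a for a, _ in brk] + xs[-1:]
--     return list(zip(starts, ends))
-- ===== Notes on version B (the rewrite author's own statement) =====
-- stated objective: idiomatic
-- what changed: Replaces the hand-rolled start/prev state machine with comprehensions that collect the break pairs (adjacent sorted values that are not consecutive) and zips run starts with run ends.
import Mathlib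
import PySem

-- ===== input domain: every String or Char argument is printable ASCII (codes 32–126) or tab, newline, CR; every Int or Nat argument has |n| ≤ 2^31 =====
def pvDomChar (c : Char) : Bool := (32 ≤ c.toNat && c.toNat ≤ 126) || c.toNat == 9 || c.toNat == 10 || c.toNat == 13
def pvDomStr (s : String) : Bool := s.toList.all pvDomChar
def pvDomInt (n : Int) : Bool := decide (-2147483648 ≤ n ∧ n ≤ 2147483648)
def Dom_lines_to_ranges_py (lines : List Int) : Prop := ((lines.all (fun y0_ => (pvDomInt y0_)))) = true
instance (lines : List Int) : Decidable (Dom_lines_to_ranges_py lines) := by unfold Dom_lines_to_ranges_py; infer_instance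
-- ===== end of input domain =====

-- B replaces A's start/prev state-machine loop by two break-pair comprehensions zipped together (idiomatic decomposition; same cost).


-- ===== PORT A =====
def lines_to_ranges_py (lines : List Int) : List (Int × Int) :=
  if lines = [] then []
  else
    let sorted_lines := PySem.List.sorted (PySem.Set.ofList (lines.filter (fun line => decide (0 < line)))) (fun x => x) false
    match sorted_lines with
    | [] => []
    | s0 :: rest =>
      let st := rest.foldl
        (fun (acc : List (Int × Int) × Int × Int) line =>
          if line = acc.2.2 + 1 then (acc.1, acc.2.1, line)
          else (acc.1 ++ [(acc.2.1, acc.2.2)], line, line))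
        ([], s0, s0)
      st.1 ++ [(st.2.1, st.2.2)]

-- ===== PORT B =====
def lines_to_ranges_py_alt (lines : List Int) : List (Int × Int) :=
  let xs := PySem.List.sorted (PySem.Set.ofList (lines.filter (fun line => decide (0 < line)))) (fun x => x) false
  let brk := (xs.zip (PySem.List.slice xs (some 1) none)).filter (fun p => decide (p.2 ≠ p.1 + 1))
  let starts := PySem.List.slice xs none (some 1) ++ brk.map (fun p => p.2)
  let ends := brk.map (fun p => p.1) ++ PySem.List.slice xs (some (-1)) none
  starts.zip ends

-- ===== PRECONDITION & SPEC =====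
def Spec_lines_to_ranges_py (lines : List Int) (out : List (Int × Int)) : Prop := out = lines_to_ranges_py_alt lines
instance (lines : List Int) (out : List (Int × Int)) : Decidable (Spec_lines_to_ranges_py lines out) := by unfold Spec_lines_to_ranges_py; infer_instance

-- ===== CLAIM (what is proved, stated in full; the proofs are below) =====
def Claim_equal_lines_to_ranges_py : Prop := ∀ (lines : List Int), Dom_lines_to_ranges_py lines → Spec_lines_to_ranges_py lines (lines_to_ranges_py lines)

-- ===== LEMMAS AND PROOFS =====

/-- Canonical run-grouping both ports compute. -/
def pvGo (start prev : Int) : List Int → List (Int × Int)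
  | [] => [(start, prev)]
  | l :: ls => if l = prev + 1 then pvGo start l ls else (start, prev) :: pvGo l l ls

lemma pvA_fold (rest : List Int) : ∀ (ranges : List (Int × Int)) (start prev : Int),
    (rest.foldl
        (fun (acc : List (Int × Int) × Int × Int) line =>
          if line = acc.2.2 + 1 then (acc.1, acc.2.1, line)
          else (acc.1 ++ [(acc.2.1, acc.2.2)], line, line))
        (ranges, start, prev)).1
      ++ [((rest.foldl
        (fun (acc : List (Int × Int) × Int × Int) line =>
          if line = acc.2.2 + 1 then (acc.1, acc.2.1, line)
          else (acc.1 ++ [(acc.2.1, acc.2.2)], line, line))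
        (ranges, start, prev)).2.1,
          (rest.foldl
        (fun (acc : List (Int × Int) × Int × Int) line =>
          if line = acc.2.2 + 1 then (acc.1, acc.2.1, line)
          else (acc.1 ++ [(acc.2.1, acc.2.2)], line, line))
        (ranges, start, prev)).2.2)]
    = ranges ++ pvGo start prev rest := by
  induction rest with
  | nil => intro ranges start prev; simp [pvGo]
  | cons l ls ih =>
    intro ranges start prev
    by_cases h : l = prev + 1
    · simp [List.foldl_cons, h, pvGo, ih]
    · simp [List.foldl_cons, h, pvGo, ih]

/-- last element of prev :: rest -/
def pvLast (prev : Int) : List Int → Int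
  | [] => prev
  | l :: ls => pvLast l ls

lemma pvB_zip (rest : List Int) : ∀ (start prev : Int),
    (start :: (((prev :: rest).zip rest).filter (fun p => decide (p.2 ≠ p.1 + 1))).map (fun p => p.2)).zip
      ((((prev :: rest).zip rest).filter (fun p => decide (p.2 ≠ p.1 + 1))).map (fun p => p.1) ++ [pvLast prev rest])
    = pvGo start prev rest := by
  induction rest with
  | nil => intro start prev; simp [pvGo, pvLast]
  | cons l ls ih =>
    intro start prev
    by_cases h : l = prev + 1
    · simp only [List.zip_cons_cons, List.filter_cons, h, pvGo, pvLast]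
      simpa [h] using ih start l
    · simp only [List.zip_cons_cons, List.filter_cons, pvGo, pvLast]
      have : ¬ (l = prev + 1) := h
      simp only [this, decide_not]
      simpa [h, List.zip_cons_cons] using ih l l

lemma pv_slice_last (xs : List Int) :
    PySem.List.slice xs (some (-1)) none = xs.drop (xs.length - 1) :=
  PySem.List.slice_from_neg_one xs

lemma pv_drop_last_cons (prev : Int) (rest : List Int) :
    (prev :: rest).drop ((prev :: rest).length - 1) = [pvLast prev rest] := by
  induction rest generalizing prev with
  | nil => simp [pvLast]
  | cons l ls ih => simpa [pvLast, List.length_cons] using ih l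

-- ===== VERDICT (by name: the statement is the Claim_ definition above) =====
theorem lines_to_ranges_py_spec : Claim_equal_lines_to_ranges_py := by
  intro lines _
  unfold Spec_lines_to_ranges_py lines_to_ranges_py lines_to_ranges_py_alt
  by_cases hnil : lines = []
  · subst hnil; simp [PySem.Set.ofList, PySem.List.sorted]; exact Or.inl rfl
  · simp only [hnil, if_false]
    set xs := PySem.List.sorted (PySem.Set.ofList (lines.filter (fun line => decide (0 < line)))) (fun x => x) false with hxs
    match xs with
    | [] => simp; exact Or.inl rfl
    | s0 :: rest =>
      dsimp only
      rw [pvA_fold rest [] s0 s0]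
      rw [PySem.List.slice_from_one, pv_slice_last, pv_drop_last_cons]
      rw [show PySem.List.slice (s0 :: rest) none (some 1) = [s0] from by
        simpa using PySem.List.slice_to_natCast (s0 :: rest) 1]
      simpa using (pvB_zip rest s0 s0).symm
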